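-- pv_equiv track=rewrite | github.com/root-11/tablite | 2023.10.9/tablite/file_reader_utils.py | detect_seperator
-- ===== SOURCE A (Python) =====
-- def detect_seperator(text):
--     """
--     :param path: pathlib.Path objects
--     :param encoding: file encoding.
--     :return: 1 character.
--     """
--     # After reviewing the logic in the CSV sniffer, I concluded that all it
--     # really does is to look for a non-text character. As the separator is
--     # determined by the first line, which almost always is a line of headers,
--     # the text characters will be utf-8,16 or ascii letters plus white space.
--     # This leaves the characters ,;:| and \t as potential separators, with one
--     # exception: files that use whitespace as separator. My logic is therefore
--     # to (1) find the set of characters that intersect with ',;:|\t' which in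
--     # practice is a single character, unless (2) it is empty whereby it must
--     # be whitespace.
--     if len(text) == 0:
--         return None
--     seps = {",", "\t", ";", ":", "|"}.intersection(text)
--     if not seps:
--         if " " in text:
--             return " "
--         if "\n" in text:
--             return "\n"
--         else:
--             raise ValueError("separator not detected")
--     if len(seps) == 1:
--         return seps.pop()
--     else:
--         frq = [(text.count(i), i) for i in seps]
--         frq.sort(reverse=True)  # most frequent first.
--         return frq[0][-1]
-- ===== SOURCE B (Python) =====
-- def detect_seperator(text):
--     """Sort the candidate-separator occurrences and pick the longest run,
--     instead of intersecting and counting per candidate."""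
--     if len(text) == 0:
--         return None
--     hits = sorted(ch for ch in text if ch in ",\t;:|")
--     if not hits:
--         if " " in text:
--             return " "
--         if "\n" in text:
--             return "\n"
--         raise ValueError("separator not detected")
--     # hits is ascending, so equal chars form runs; the best (longest, then
--     # rightmost = greatest char) run is the most frequent candidate with
--     # ties broken toward the greater character, as in A's (count, char) sort.
--     best_char, best_len = hits[0], 0
--     cur_char, cur_len = hits[0], 0
--     for ch in hits:
--         if ch == cur_char:
--             cur_len += 1
--         else:
--             if cur_len >= best_len:
--                 best_char, best_len = cur_char, cur_len
--             cur_char, cur_len = ch, 1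
--     if cur_len >= best_len:
--         best_char = cur_char
--     return best_char
-- ===== Notes on version B (the rewrite author's own statement) =====
-- stated objective: alternative
-- what changed: B replaces A's set-intersection plus per-candidate text.count and descending sort with a sort-then-scan algorithm: it extracts the candidate-separator occurrences, sorts them, and picks the best run (longest, ties to the rightmost/greatest char) in one linear scan over the sorted runs.
import Mathlib
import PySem

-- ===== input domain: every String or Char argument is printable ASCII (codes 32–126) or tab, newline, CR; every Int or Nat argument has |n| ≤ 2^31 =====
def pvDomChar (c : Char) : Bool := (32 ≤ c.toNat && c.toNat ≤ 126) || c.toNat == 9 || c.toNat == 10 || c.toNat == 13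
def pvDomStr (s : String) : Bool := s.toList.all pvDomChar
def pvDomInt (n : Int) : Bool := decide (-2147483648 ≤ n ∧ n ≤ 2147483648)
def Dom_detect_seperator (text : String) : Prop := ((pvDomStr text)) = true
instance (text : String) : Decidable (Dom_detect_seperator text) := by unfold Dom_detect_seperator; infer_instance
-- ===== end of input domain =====

-- B sorts the candidate-separator occurrences and picks the best run in one scan,
-- instead of A's set-intersection plus per-candidate text.count and descending sort
-- (objective: alternative).

-- ===== PORT A =====
-- the candidate separators {",", "\t", ";", ":", "|"} (a fixed literal in both Pythons)
def pvCands : List Char := [',', '\t', ';', ':', '|']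

def detect_seperator (text : String) : Option String :=
  let cs := text.toList
  if cs.length = 0 then none
  else
    -- seps = {",", "\t", ";", ":", "|"}.intersection(text)
    let seps : PySem.Set Char := PySem.Set.inter (PySem.Set.ofList pvCands) cs
    match seps with
    | [] =>
      if PySem.Chars.isIn [' '] cs then some " "
      else if PySem.Chars.isIn ['\n'] cs then some "\n"
      else none  -- Python: raise ValueError("separator not detected"); excluded by Pre_
    | [c] => some (String.ofList [c])  -- len(seps) == 1: seps.pop()
    | c1 :: c2 :: rest =>
      -- frq = [(text.count(i), i) for i in seps]  (text.count of a 1-char string = char count, exact)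
      let frq : List (Int × Char) := (c1 :: c2 :: rest).map (fun c => ((cs.count c : Int), c))
      -- frq.sort(reverse=True); return frq[0][-1]  (Python tuple order = lexicographic on (count, char))
      match PySem.List.sorted2 frq Prod.fst Prod.snd true with
      | [] => none  -- unreachable: frq ≠ []
      | p :: _ => some (String.ofList [p.2])

-- ===== PORT B =====
-- loop body: if ch == cur_char: cur_len += 1
--            else: (if cur_len >= best_len: best := cur); cur := (ch, 1)
-- state = (best_char, best_len, cur_char, cur_len)
def pvRunStep (s : Char × Int × Char × Int) (ch : Char) : Char × Int × Char × Int :=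
  match s with
  | (bc, bl, cc, cl) =>
    if ch = cc then (bc, bl, cc, cl + 1)
    else if bl ≤ cl then (cc, cl, ch, 1) else (bc, bl, ch, 1)

-- final: if cur_len >= best_len: best_char = cur_char
def pvFinish (s : Char × Int × Char × Int) : Char :=
  if s.2.1 ≤ s.2.2.2 then s.2.2.1 else s.1

def detect_seperator_alt (text : String) : Option String :=
  let cs := text.toList
  if cs.length = 0 then none
  else
    -- hits = sorted(ch for ch in text if ch in ",\t;:|")  (single-char 'in' = char membership, exact)
    let hits := PySem.List.sorted (cs.filter (fun ch => pvCands.contains ch)) (fun c => c) false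
    match hits with
    | [] =>
      if PySem.Chars.isIn [' '] cs then some " "
      else if PySem.Chars.isIn ['\n'] cs then some "\n"
      else none  -- Python: raise ValueError("separator not detected"); excluded by Pre_
    | h :: t =>
      let st := (h :: t).foldl pvRunStep (h, 0, h, 0)
      some (String.ofList [pvFinish st])

-- ===== PRECONDITION & SPEC =====
-- Pre_ excludes exactly the inputs on which Python A raises ValueError: nonempty text
-- containing no candidate separator, no space and no newline (B raises there too).
def Pre_detect_seperator (text : String) : Prop :=
  text.toList = [] ∨ ',' ∈ text.toList ∨ '\t' ∈ text.toList ∨ ';' ∈ text.toList ∨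
    ':' ∈ text.toList ∨ '|' ∈ text.toList ∨ ' ' ∈ text.toList ∨ '\n' ∈ text.toList
instance (text : String) : Decidable (Pre_detect_seperator text) := by
  unfold Pre_detect_seperator; infer_instance

def pvWitness_detect_seperator : String := "a,b"

def Spec_detect_seperator (text : String) (out : Option String) : Prop := out = detect_seperator_alt text
instance (text : String) (out : Option String) : Decidable (Spec_detect_seperator text out) := by unfold Spec_detect_seperator; infer_instance

-- ===== CLAIM (what is proved, stated in full; the proofs are below) =====
def Claim_equal_detect_seperator : Prop := ∀ (text : String), Dom_detect_seperator text → Pre_detect_seperator text → Spec_detect_seperator text (detect_seperator text)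

-- ===== LEMMAS AND PROOFS =====

-- strict lexicographic order on (count, char) pairs — Python's tuple '<'
def pvPL (a b : Int × Char) : Prop := a.1 < b.1 ∨ (a.1 = b.1 ∧ a.2 < b.2)

lemma pvPL_irrefl (a : Int × Char) : ¬ pvPL a a := by
  simp [pvPL]

lemma pvPL_trans {a b c : Int × Char} (h1 : pvPL a b) (h2 : pvPL b c) : pvPL a c := by
  rcases h1 with h1 | ⟨h1, h1'⟩ <;> rcases h2 with h2 | ⟨h2, h2'⟩
  · exact Or.inl (lt_trans h1 h2)
  · exact Or.inl (h2 ▸ h1)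
  · exact Or.inl (h1 ▸ h2)
  · exact Or.inr ⟨h1.trans h2, lt_trans h1' h2'⟩

lemma pvPL_total (a b : Int × Char) : pvPL a b ∨ pvPL b a ∨ (a.1 = b.1 ∧ a.2 = b.2) := by
  rcases lt_trichotomy a.1 b.1 with h | h | h
  · exact Or.inl (Or.inl h)
  · rcases lt_trichotomy a.2 b.2 with h2 | h2 | h2
    · exact Or.inl (Or.inr ⟨h, h2⟩)
    · exact Or.inr (Or.inr ⟨h, h2⟩)
    · exact Or.inr (Or.inl (Or.inr ⟨h.symm, h2⟩))
  · exact Or.inr (Or.inl (Or.inl h))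

-- the comparison boolean used by PySem.List.sorted2 is exactly pvPL
lemma pvLtb_iff (p q : Int × Char) :
    (decide (p.1 < q.1) || (!decide (q.1 < p.1) && decide (p.2 < q.2))) = true ↔ pvPL p q := by
  simp only [Bool.or_eq_true, Bool.and_eq_true, Bool.not_eq_true', decide_eq_true_iff,
    decide_eq_false_iff_not]
  constructor
  · rintro (h | ⟨h1, h2⟩)
    · exact Or.inl h
    · rcases lt_trichotomy p.1 q.1 with h | h | h
      · exact Or.inl h
      · exact Or.inr ⟨h, h2⟩
      · exact absurd h h1
  · rintro (h | ⟨h1, h2⟩)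
    · exact Or.inl h
    · exact Or.inr ⟨by rw [h1]; exact lt_irrefl _, h2⟩

-- ---- A side: the head of the reverse sorted2 list is a lex maximum ----
def pvBefore : (Int × Char) → (Int × Char) → Bool := fun a b =>
  decide (b.1 < a.1) || (!decide (a.1 < b.1) && decide (b.2 < a.2))

lemma pvBefore_iff (a b : Int × Char) : pvBefore a b = true ↔ pvPL b a := pvLtb_iff b a

lemma pvInsert_head_inv (x : Int × Char) (acc : List (Int × Char))
    (h : ∀ hd tl, acc = hd :: tl → ∀ y ∈ acc, ¬ pvPL hd y) :
    ∀ hd tl, PySem.List.insertBy pvBefore x acc = hd :: tl →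
      ∀ y ∈ PySem.List.insertBy pvBefore x acc, ¬ pvPL hd y := by
  cases acc with
  | nil =>
    intro hd tl heq y hy
    simp only [PySem.List.insertBy] at heq hy
    cases heq
    simp only [List.mem_singleton] at hy
    subst hy; exact pvPL_irrefl _
  | cons a t =>
    intro hd tl heq y hy
    by_cases hb : pvBefore x a = true
    · have hax : pvPL a x := (pvBefore_iff x a).mp hb
      simp only [PySem.List.insertBy, hb, if_true] at heq hy
      cases heq
      rcases List.mem_cons.mp hy with rfl | hy
      · exact pvPL_irrefl _
      · intro hxy
        exact (h a t rfl y hy) (pvPL_trans hax hxy)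
    · have hax : ¬ pvPL a x := fun hh => hb ((pvBefore_iff x a).mpr hh)
      simp only [PySem.List.insertBy, hb] at heq hy
      cases heq
      rcases List.mem_cons.mp hy with rfl | hy
      · exact pvPL_irrefl _
      · rcases (PySem.List.mem_insertBy _ _ _ _).mp hy with rfl | hy
        · exact hax
        · exact h a t rfl y (List.mem_cons_of_mem _ hy)

lemma pvFold_head_inv :
    ∀ (l acc : List (Int × Char)),
      (∀ hd tl, acc = hd :: tl → ∀ y ∈ acc, ¬ pvPL hd y) →
      ∀ hd tl, l.foldl (fun a x => PySem.List.insertBy pvBefore x a) acc = hd :: tl →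
        ∀ y ∈ l.foldl (fun a x => PySem.List.insertBy pvBefore x a) acc, ¬ pvPL hd y := by
  intro l
  induction l with
  | nil => intro acc h hd tl heq y hy; exact h hd tl heq y hy
  | cons x l ih =>
    intro acc h hd tl heq y hy
    exact ih (PySem.List.insertBy pvBefore x acc) (pvInsert_head_inv x acc h) hd tl heq y hy

lemma pvSorted2_head_max (l : List (Int × Char)) (p : Int × Char) (t : List (Int × Char))
    (h : PySem.List.sorted2 l Prod.fst Prod.snd true = p :: t) :
    p ∈ l ∧ ∀ y ∈ l, ¬ pvPL p y := by
  have hperm := PySem.List.sorted2_perm l Prod.fst Prod.snd true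
  have hpmem : p ∈ l := hperm.mem_iff.mp (h ▸ List.mem_cons_self ..)
  have hdef : PySem.List.sorted2 l Prod.fst Prod.snd true =
      l.foldl (fun a x => PySem.List.insertBy pvBefore x a) [] := rfl
  refine ⟨hpmem, fun y hy hpy => ?_⟩
  have hy' : y ∈ l.foldl (fun a x => PySem.List.insertBy pvBefore x a) [] := by
    rw [← hdef]; exact hperm.mem_iff.mpr hy
  exact pvFold_head_inv l [] (by intro hd tl heq; cases heq) p t (by rw [← hdef]; exact h) y hy' hpy

-- ---- B side: the run scan over a sorted list returns a lex maximum ----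
-- the value the scan has implicitly associated with a char, given the state and the rest
def pvVal (bc : Char) (bl : Int) (cc : Char) (cl : Int) (l : List Char) (out : Char) : Int :=
  if out = cc then cl + (l.count cc : Int) else if out = bc then bl else (l.count out : Int)

lemma pvPL_le_trans {a p q : Int × Char} (h : ¬ pvPL a q) (h1 : p.1 ≤ q.1)
    (h2 : p.1 = q.1 → p.2 ≤ q.2) : ¬ pvPL a p := by
  intro hap
  apply h
  rcases lt_or_eq_of_le h1 with hlt | heq
  · exact pvPL_trans hap (Or.inl hlt)
  · rcases lt_or_eq_of_le (h2 heq) with hc | hc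
    · exact pvPL_trans hap (Or.inr ⟨heq, hc⟩)
    · have hpq : p = q := Prod.ext heq hc
      rwa [hpq] at hap
lemma pvRun_spec :
    ∀ (l : List Char) (bc cc : Char) (bl cl : Int),
      l.Pairwise (· ≤ ·) → (∀ y ∈ l, cc ≤ y) → bc ≤ cc → (bc = cc → bl ≤ cl) →
      (pvFinish (l.foldl pvRunStep (bc, bl, cc, cl)) = bc ∨
        pvFinish (l.foldl pvRunStep (bc, bl, cc, cl)) = cc ∨
        pvFinish (l.foldl pvRunStep (bc, bl, cc, cl)) ∈ l) ∧
      ¬ pvPL (pvVal bc bl cc cl l (pvFinish (l.foldl pvRunStep (bc, bl, cc, cl))),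
              pvFinish (l.foldl pvRunStep (bc, bl, cc, cl))) (bl, bc) ∧
      ¬ pvPL (pvVal bc bl cc cl l (pvFinish (l.foldl pvRunStep (bc, bl, cc, cl))),
              pvFinish (l.foldl pvRunStep (bc, bl, cc, cl))) (cl + (l.count cc : Int), cc) ∧
      ∀ y ∈ l, y ≠ cc →
        ¬ pvPL (pvVal bc bl cc cl l (pvFinish (l.foldl pvRunStep (bc, bl, cc, cl))),
                pvFinish (l.foldl pvRunStep (bc, bl, cc, cl))) ((l.count y : Int), y) := by
  intro l
  induction l with
  | nil =>
    intro bc cc bl cl _ _ hbc hbleq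
    rw [List.foldl_nil]
    rw [show (([] : List Char).count cc : Int) = 0 from by simp, add_zero]
    by_cases h : bl ≤ cl
    · rw [show pvFinish (bc, bl, cc, cl) = cc from by simp [pvFinish, h]]
      rw [show pvVal bc bl cc cl [] cc = cl from by simp [pvVal]]
      refine ⟨Or.inr (Or.inl rfl), ?_, pvPL_irrefl _, by simp⟩
      rintro (hlt | ⟨heq, hlt⟩)
      · omega
      · exact absurd hlt (not_lt.mpr hbc)
    · have hne : bc ≠ cc := fun he => h (hbleq he)
      rw [show pvFinish (bc, bl, cc, cl) = bc from by simp [pvFinish, h]]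
      rw [show pvVal bc bl cc cl [] bc = bl from by simp [pvVal, hne]]
      refine ⟨Or.inl rfl, pvPL_irrefl _, ?_, by simp⟩
      rintro (hlt | ⟨heq, hlt⟩) <;> omega
  | cons x l' ih =>
    intro bc cc bl cl hpw hcc hbc hbleq
    have hpw' : l'.Pairwise (· ≤ ·) := hpw.tail
    have hxle : ∀ y ∈ l', x ≤ y := fun y hy => (List.pairwise_cons.mp hpw).1 y hy
    rw [List.foldl_cons]
    by_cases hx : x = cc
    · -- the current run continues
      subst hx
      rw [show pvRunStep (bc, bl, x, cl) x = (bc, bl, x, cl + 1) from by simp [pvRunStep]]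
      obtain ⟨hi1, hi2, hi3, hi4⟩ :=
        ih bc x bl (cl + 1) hpw' hxle hbc (fun h => by have := hbleq h; omega)
      have hval : ∀ O, pvVal bc bl x cl (x :: l') O = pvVal bc bl x (cl + 1) l' O := by
        intro O
        unfold pvVal
        by_cases hO : O = x
        · rw [if_pos hO, if_pos hO, List.count_cons_self]
          push_cast; ring
        · rw [if_neg hO, if_neg hO]
          by_cases hOb : O = bc
          · rw [if_pos hOb, if_pos hOb]
          · rw [if_neg hOb, if_neg hOb]
            simp [Ne.symm hO]
      refine ⟨?_, ?_, ?_, ?_⟩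
      · rcases hi1 with h | h | h
        · exact Or.inl h
        · exact Or.inr (Or.inl h)
        · exact Or.inr (Or.inr (List.mem_cons_of_mem _ h))
      · rw [hval]; exact hi2
      · rw [hval, show ((List.count x (x :: l') : Nat) : Int) = (List.count x l' : Nat) + 1 from by
          rw [List.count_cons_self]; push_cast; ring]
        rw [show cl + ((List.count x l' : Nat) + 1 : Int) = cl + 1 + (List.count x l' : Nat) from by ring]
        exact hi3
      · intro y hy hyx
        rw [hval]
        have hy' : y ∈ l' := by
          rcases List.mem_cons.mp hy with rfl | h
          · exact absurd rfl hyx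
          · exact h
        rw [show ((List.count y (x :: l') : Nat) : Int) = (List.count y l' : Nat) from by
          simp [Ne.symm hyx]]
        exact hi4 y hy' hyx
    · -- a new run starts at x
      have hccx : cc < x := lt_of_le_of_ne (hcc x (List.mem_cons_self ..)) (fun h => hx h.symm)
      have hccl : cc ∉ x :: l' := by
        intro h
        rcases List.mem_cons.mp h with h | h
        · exact hx h.symm
        · exact absurd (hxle cc h) (not_le.mpr hccx)
      have hcnt0 : ((List.count cc (x :: l') : Nat) : Int) = 0 := by
        rw [List.count_eq_zero_of_not_mem hccl]; rfl
      rw [hcnt0, add_zero]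
      by_cases hb : bl ≤ cl
      · -- current run becomes the best so far
        rw [show pvRunStep (bc, bl, cc, cl) x = (cc, cl, x, 1) from by simp [pvRunStep, hx, hb]]
        obtain ⟨hi1, hi2, hi3, hi4⟩ :=
          ih cc x cl 1 hpw' hxle (le_of_lt hccx) (fun h => absurd h.symm hx)
        have hbx : bc < x := lt_of_le_of_lt hbc hccx
        have hval : ∀ O, (O = cc ∨ O = x ∨ O ∈ l') →
            pvVal bc bl cc cl (x :: l') O = pvVal cc cl x 1 l' O := by
          intro O hO
          unfold pvVal
          by_cases hOx : O = x
          · have h1 : O ≠ cc := by rw [hOx]; exact hx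
            have h2 : O ≠ bc := by rw [hOx]; exact (ne_of_gt hbx)
            rw [if_neg h1, if_neg h2, if_pos hOx, hOx, List.count_cons_self]
            push_cast; ring
          · by_cases hOc : O = cc
            · rw [if_pos hOc, if_neg hOx, if_pos hOc, hcnt0, add_zero]
            · have hOl : O ∈ l' := by
                rcases hO with h | h | h
                · exact absurd h hOc
                · exact absurd h hOx
                · exact h
              have hOb : O ≠ bc := by
                intro h
                exact absurd (hxle O hOl) (not_le.mpr (h ▸ hbx))
              rw [if_neg hOc, if_neg hOb, if_neg hOx, if_neg hOc]
              simp [Ne.symm hOx]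
        refine ⟨?_, ?_, ?_, ?_⟩
        · rcases hi1 with h | h | h
          · exact Or.inr (Or.inl h)
          · exact Or.inr (Or.inr (by rw [h]; exact List.mem_cons_self ..))
          · exact Or.inr (Or.inr (List.mem_cons_of_mem _ h))
        · rw [hval _ hi1]
          exact pvPL_le_trans hi2 hb (fun _ => hbc)
        · rw [hval _ hi1]
          exact hi2
        · intro y hy hyc
          rw [hval _ hi1]
          by_cases hyx : y = x
          · subst hyx
            rw [show ((List.count y (y :: l') : Nat) : Int) = 1 + (List.count y l' : Nat) from by
              rw [List.count_cons_self]; push_cast; ring]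
            exact hi3
          · have hy' : y ∈ l' := by
              rcases List.mem_cons.mp hy with h | h
              · exact absurd h hyx
              · exact h
            rw [show ((List.count y (x :: l') : Nat) : Int) = (List.count y l' : Nat) from by
              simp [Ne.symm hyx]]
            exact hi4 y hy' hyx
      · -- current run is discarded
        have hbcc : bc ≠ cc := fun h => hb (hbleq h)
        have hbclt : bc < cc := lt_of_le_of_ne hbc hbcc
        have hbx : bc < x := lt_trans hbclt hccx
        rw [show pvRunStep (bc, bl, cc, cl) x = (bc, bl, x, 1) from by simp [pvRunStep, hx, hb]]
        obtain ⟨hi1, hi2, hi3, hi4⟩ :=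
          ih bc x bl 1 hpw' hxle (le_of_lt hbx) (fun h => absurd h (ne_of_lt hbx))
        have hval : ∀ O, (O = bc ∨ O = x ∨ O ∈ l') →
            pvVal bc bl cc cl (x :: l') O = pvVal bc bl x 1 l' O := by
          intro O hO
          unfold pvVal
          by_cases hOx : O = x
          · have h1 : O ≠ cc := by rw [hOx]; exact hx
            have h2 : O ≠ bc := by rw [hOx]; exact (ne_of_gt hbx)
            rw [if_neg h1, if_neg h2, if_pos hOx, hOx, List.count_cons_self]
            push_cast; ring
          · by_cases hOb : O = bc
            · have h1 : O ≠ cc := hOb ▸ hbcc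
              rw [if_neg h1, if_pos hOb, if_neg hOx, if_pos hOb]
            · have hOl : O ∈ l' := by
                rcases hO with h | h | h
                · exact absurd h hOb
                · exact absurd h hOx
                · exact h
              have hOc : O ≠ cc := by
                intro h
                exact absurd (hxle O hOl) (not_le.mpr (h ▸ hccx))
              rw [if_neg hOc, if_neg hOb, if_neg hOx, if_neg hOb]
              simp [Ne.symm hOx]
        refine ⟨?_, ?_, ?_, ?_⟩
        · rcases hi1 with h | h | h
          · exact Or.inl h
          · exact Or.inr (Or.inr (by rw [h]; exact List.mem_cons_self ..))
          · exact Or.inr (Or.inr (List.mem_cons_of_mem _ h))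
        · rw [hval _ hi1]
          exact hi2
        · rw [hval _ hi1]
          intro hap
          exact hi2 (pvPL_trans hap (Or.inl (by omega)))
        · intro y hy hyc
          rw [hval _ hi1]
          by_cases hyx : y = x
          · subst hyx
            rw [show ((List.count y (y :: l') : Nat) : Int) = 1 + (List.count y l' : Nat) from by
              rw [List.count_cons_self]; push_cast; ring]
            exact hi3
          · have hy' : y ∈ l' := by
              rcases List.mem_cons.mp hy with h | h
              · exact absurd h hyx
              · exact h
            rw [show ((List.count y (x :: l') : Nat) : Int) = (List.count y l' : Nat) from by
              simp [Ne.symm hyx]]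
            exact hi4 y hy' hyx

-- counts inside the sorted filtered list are counts in the text (for its members)
lemma pvHits_count (cs : List Char) (z : Char)
    (hz : z ∈ PySem.List.sorted (cs.filter (fun ch => pvCands.contains ch)) (fun c => c) false) :
    ((PySem.List.sorted (cs.filter (fun ch => pvCands.contains ch)) (fun c => c) false).count z : Int)
      = (cs.count z : Int) := by
  have hperm := PySem.List.sorted_perm (cs.filter (fun ch => pvCands.contains ch)) (fun c => c) false
  rw [hperm.count_eq, List.count_filter]
  have hzf : z ∈ cs.filter (fun ch => pvCands.contains ch) := hperm.mem_iff.mp hz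
  have hz2 : z ∈ pvCands := by simpa using (List.mem_filter.mp hzf).2
  simp [hz2]

lemma pvHits_mem (cs : List Char) (z : Char) :
    (z ∈ PySem.List.sorted (cs.filter (fun ch => pvCands.contains ch)) (fun c => c) false)
      ↔ (z ∈ pvCands.filter (fun x => cs.contains x)) := by
  rw [PySem.List.mem_sorted, List.mem_filter, List.mem_filter]
  simp [and_comm]

-- B's scan result on nonempty hits: a member achieving the lexicographic maximum
lemma pvB_max (cs : List Char) (h : Char) (t : List Char)
    (hh : PySem.List.sorted (cs.filter (fun ch => pvCands.contains ch)) (fun c => c) false = h :: t) :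
    pvFinish ((h :: t).foldl pvRunStep (h, 0, h, 0)) ∈ h :: t ∧
    ∀ y ∈ h :: t,
      ¬ pvPL (((h :: t).count (pvFinish ((h :: t).foldl pvRunStep (h, 0, h, 0))) : Int),
              pvFinish ((h :: t).foldl pvRunStep (h, 0, h, 0)))
             (((h :: t).count y : Int), y) := by
  have hpw : (h :: t).Pairwise (· ≤ ·) := by
    have := PySem.List.sorted_pairwise (cs.filter (fun ch => pvCands.contains ch)) (fun c => c)
    rw [hh] at this
    exact this
  have hle : ∀ y ∈ h :: t, h ≤ y := by
    intro y hy
    rcases List.mem_cons.mp hy with rfl | hy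
    · exact le_refl _
    · exact (List.pairwise_cons.mp hpw).1 y hy
  obtain ⟨hi1, hi2, hi3, hi4⟩ :=
    pvRun_spec (h :: t) h h 0 0 hpw hle (le_refl _) (fun _ => le_refl _)
  have hO : pvFinish ((h :: t).foldl pvRunStep (h, 0, h, 0)) ∈ h :: t := by
    rcases hi1 with h1 | h1 | h1
    · rw [h1]; exact List.mem_cons_self ..
    · rw [h1]; exact List.mem_cons_self ..
    · exact h1
  have hval : pvVal h 0 h 0 (h :: t) (pvFinish ((h :: t).foldl pvRunStep (h, 0, h, 0)))
      = (((h :: t).count (pvFinish ((h :: t).foldl pvRunStep (h, 0, h, 0)))) : Int) := by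
    unfold pvVal
    by_cases hOh : pvFinish ((h :: t).foldl pvRunStep (h, 0, h, 0)) = h
    · rw [if_pos hOh, hOh, zero_add]
    · rw [if_neg hOh, if_neg hOh]
  refine ⟨hO, fun y hy => ?_⟩
  rw [← hval]
  by_cases hyh : y = h
  · subst hyh
    have := hi3
    rwa [zero_add] at this
  · exact hi4 y hy hyh

-- A's sorted2 branch head: a member achieving the lexicographic maximum
lemma pvA_max (cs : List Char) (c1 c2 : Char) (rest : List Char) :
    ∃ a, (match PySem.List.sorted2 ((c1 :: c2 :: rest).map (fun c => ((cs.count c : Int), c)))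
            Prod.fst Prod.snd true with
          | [] => (none : Option String)
          | p :: _ => some (String.ofList [p.2])) = some (String.ofList [a]) ∧
      a ∈ c1 :: c2 :: rest ∧
      ∀ y ∈ c1 :: c2 :: rest, ¬ pvPL ((cs.count a : Int), a) ((cs.count y : Int), y) := by
  cases hs : PySem.List.sorted2 ((c1 :: c2 :: rest).map (fun c => ((cs.count c : Int), c)))
      Prod.fst Prod.snd true with
  | nil =>
    exfalso
    have := (PySem.List.sorted2_perm ((c1 :: c2 :: rest).map (fun c => ((cs.count c : Int), c)))
      Prod.fst Prod.snd true).length_eq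
    rw [hs] at this
    simp at this
  | cons p tl =>
    obtain ⟨hpmem, hpmax⟩ := pvSorted2_head_max _ p tl hs
    obtain ⟨a, hamem, hfa⟩ := List.mem_map.mp hpmem
    refine ⟨a, by rw [← hfa], hamem, fun y hy => ?_⟩
    have := hpmax ((cs.count y : Int), y) (List.mem_map.mpr ⟨y, hy, rfl⟩)
    rwa [← hfa] at this

lemma pvNil_iff (cs : List Char) :
    PySem.List.sorted (cs.filter (fun ch => pvCands.contains ch)) (fun c => c) false = [] ↔
      pvCands.filter (fun x => cs.contains x) = [] := by
  rw [PySem.List.sorted_eq_nil_iff, List.filter_eq_nil_iff, List.filter_eq_nil_iff]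
  constructor
  · intro hd a ha hb
    exact absurd (by simpa using hb) (fun h => hd a h (by simpa using ha))
  · intro hd a ha hb
    exact absurd (by simpa using hb) (fun h => hd a h (by simpa using ha))

lemma pvMax_unique (cnt : Char → Int) {a b : Char} {S T : List Char}
    (hme : ∀ z, z ∈ S ↔ z ∈ T) (ha : a ∈ S)
    (hamax : ∀ y ∈ S, ¬ pvPL (cnt a, a) (cnt y, y)) (hb : b ∈ T)
    (hbmax : ∀ y ∈ T, ¬ pvPL (cnt b, b) (cnt y, y)) : a = b := by
  have h1 := hamax b ((hme b).mpr hb)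
  have h2 := hbmax a ((hme a).mp ha)
  rcases pvPL_total (cnt a, a) (cnt b, b) with h | h | h
  · exact absurd h h1
  · exact absurd h h2
  · exact h.2

-- ===== VERDICT (by name: the statement is the Claim_ definition above) =====
theorem detect_seperator_spec : Claim_equal_detect_seperator := by
  unfold Claim_equal_detect_seperator
  intro text _ _
  unfold Spec_detect_seperator detect_seperator detect_seperator_alt
  by_cases h0 : text.toList.length = 0
  · simp [h0]
  · simp only [h0, if_false]
    have hinter : PySem.Set.inter (PySem.Set.ofList pvCands) text.toList =
        pvCands.filter (fun x => text.toList.contains x) := by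
      rw [show PySem.Set.ofList pvCands = pvCands from by decide]; rfl
    rw [hinter]
    cases hs : pvCands.filter (fun x => text.toList.contains x) with
    | nil =>
      rw [(pvNil_iff text.toList).mpr hs]
    | cons c r =>
      obtain ⟨h, t, hh⟩ : ∃ h t, PySem.List.sorted
          (text.toList.filter (fun ch => pvCands.contains ch)) (fun c => c) false = h :: t := by
        cases he : PySem.List.sorted
            (text.toList.filter (fun ch => pvCands.contains ch)) (fun c => c) false with
        | nil => exact absurd ((pvNil_iff text.toList).mp he) (by rw [hs]; simp)
        | cons a b => exact ⟨a, b, rfl⟩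
      rw [hh]
      obtain ⟨hBmem, hBmax⟩ := pvB_max text.toList h t hh
      have hmem : ∀ z, z ∈ h :: t ↔ z ∈ c :: r := by
        intro z
        rw [← hh, ← hs]
        exact pvHits_mem text.toList z
      have hBmax' : ∀ y ∈ h :: t,
          ¬ pvPL ((text.toList.count (pvFinish ((h :: t).foldl pvRunStep (h, 0, h, 0))) : Int),
                  pvFinish ((h :: t).foldl pvRunStep (h, 0, h, 0)))
                 ((text.toList.count y : Int), y) := by
        intro y hy
        have hcO := pvHits_count text.toList _ (hh ▸ hBmem)
        have hcy := pvHits_count text.toList y (hh ▸ hy)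
        rw [hh] at hcO hcy
        rw [← hcO, ← hcy]
        exact hBmax y hy
      cases r with
      | nil =>
        have ha : c = pvFinish ((h :: t).foldl pvRunStep (h, 0, h, 0)) :=
          pvMax_unique (fun z => (text.toList.count z : Int))
            (fun z => (hmem z).symm) (List.mem_cons_self ..)
            (by intro y hy; rcases List.mem_cons.mp hy with rfl | hy; exact pvPL_irrefl _; simp at hy)
            hBmem hBmax'
        dsimp only
        rw [ha]
      | cons c2 rest =>
        obtain ⟨a, heq, hamem, hamax⟩ := pvA_max text.toList c c2 rest
        dsimp only
        rw [heq]
        have ha : a = pvFinish ((h :: t).foldl pvRunStep (h, 0, h, 0)) :=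
          pvMax_unique (fun z => (text.toList.count z : Int))
            (fun z => (hmem z).symm) hamem hamax hBmem hBmax'
        rw [ha]
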